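-- pv_equiv track=rewrite | github.com/MattLangsenkamp/tangent-s | src/python/ranking/pairs_matching.py | unique_ancestors
-- ===== SOURCE A (Python) =====
-- def unique_ancestors(pairs_list):
--     # count unique elements
--     elements = {}
--     for ancestor, descendant, rel_location, abs_location in pairs_list:
--         if ancestor not in elements:
--             elements[ancestor] = {}
--
--         if abs_location not in elements[ancestor]:
--             elements[ancestor][abs_location] = 1
--         else:
--             elements[ancestor][abs_location] += 1
--
--     unique = {}
--     for tag in elements:
--         unique[tag] = len(elements[tag])
--
--     return unique
-- ===== SOURCE B (Python) =====
-- def unique_ancestors(pairs_list):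
--     # quadratic first-occurrence scan: row i adds 1 to its ancestor's count
--     # iff no earlier row carries the same (ancestor, abs_location) pair
--     unique = {}
--     for i, (ancestor, _descendant, _rel_location, abs_location) in enumerate(pairs_list):
--         if not any(p[0] == ancestor and p[3] == abs_location for p in pairs_list[:i]):
--             unique[ancestor] = unique.get(ancestor, 0) + 1
--     return unique
-- ===== Notes on version B (the rewrite author's own statement) =====
-- stated objective: alternative
-- what changed: Replaces A's hash-based nested count-dicts plus a second len-pass with a comparison-based first-occurrence scan: one loop in which a row increments its ancestor's count iff no earlier row carries the same (ancestor, abs_location) pair, with no auxiliary per-ancestor structures.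
import Mathlib
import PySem

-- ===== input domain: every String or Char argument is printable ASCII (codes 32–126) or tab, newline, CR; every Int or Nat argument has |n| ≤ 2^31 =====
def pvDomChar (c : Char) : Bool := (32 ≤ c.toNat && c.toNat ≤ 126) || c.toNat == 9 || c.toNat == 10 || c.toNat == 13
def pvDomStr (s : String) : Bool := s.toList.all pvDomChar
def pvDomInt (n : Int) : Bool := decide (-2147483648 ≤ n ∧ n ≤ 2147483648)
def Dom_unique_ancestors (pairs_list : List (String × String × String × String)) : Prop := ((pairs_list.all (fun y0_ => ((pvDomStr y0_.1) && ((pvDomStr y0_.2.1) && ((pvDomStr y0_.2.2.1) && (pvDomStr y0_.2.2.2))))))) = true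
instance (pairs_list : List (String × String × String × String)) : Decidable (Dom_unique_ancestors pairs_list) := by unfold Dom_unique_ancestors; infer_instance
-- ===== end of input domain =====

-- B replaces A's hash-based nested count-dicts plus second len-pass with a single comparison-based
-- first-occurrence scan: a row increments its ancestor's count iff no earlier row carries the same
-- (ancestor, abs_location) pair (alternative algorithm; quadratic, no auxiliary per-ancestor structures).


-- ===== PORT A =====
def uaStepA (elements : PySem.Dict String (PySem.Dict String Int))
    (p : String × String × String × String) : PySem.Dict String (PySem.Dict String Int) :=
  let ancestor := p.1
  let abs_location := p.2.2.2
  let elements :=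
    if !(elements.contains ancestor) then elements.insert ancestor PySem.Dict.empty else elements
  let inner := elements.getD ancestor PySem.Dict.empty
  let inner :=
    if !(inner.contains abs_location) then inner.insert abs_location 1
    else inner.insert abs_location (inner.getD abs_location 0 + 1)
  elements.insert ancestor inner

def unique_ancestors (pairs_list : List (String × String × String × String)) : List (String × Int) :=
  let elements := pairs_list.foldl uaStepA PySem.Dict.empty
  let unique : PySem.Dict String Int :=
    elements.items.foldl (fun u q => u.insert q.1 (q.2.size : Int)) PySem.Dict.empty
  unique.items

-- ===== PORT B =====
-- any(p[0] == ancestor and p[3] == abs_location for p in pref)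
def uaPrefHas (pref : List (String × String × String × String)) (ancestor abs_location : String) : Bool :=
  pref.any (fun p => p.1 == ancestor && p.2.2.2 == abs_location)

def uaStepB (pairs_list : List (String × String × String × String))
    (u : PySem.Dict String Int) (ip : Int × (String × String × String × String)) :
    PySem.Dict String Int :=
  let ancestor := ip.2.1
  let abs_location := ip.2.2.2.2
  if !(uaPrefHas (PySem.List.slice pairs_list none (some ip.1)) ancestor abs_location) then
    u.insert ancestor (u.getD ancestor 0 + 1)
  else u

def unique_ancestors_alt (pairs_list : List (String × String × String × String)) : List (String × Int) :=
  ((PySem.List.enumerate pairs_list 0).foldl (uaStepB pairs_list) PySem.Dict.empty).items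

-- ===== PRECONDITION & SPEC =====
def Spec_unique_ancestors (pairs_list : List (String × String × String × String)) (out : List (String × Int)) : Prop := out = unique_ancestors_alt pairs_list
instance (pairs_list : List (String × String × String × String)) (out : List (String × Int)) : Decidable (Spec_unique_ancestors pairs_list out) := by unfold Spec_unique_ancestors; infer_instance

-- ===== CLAIM (what is proved, stated in full; the proofs are below) =====
def Claim_equal_unique_ancestors : Prop := ∀ (pairs_list : List (String × String × String × String)), Dom_unique_ancestors pairs_list → Spec_unique_ancestors pairs_list (unique_ancestors pairs_list)

-- ===== LEMMAS AND PROOFS =====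

-- B's loop state (the counter dict) after processing the whole list l
def uaBdict (l : List (String × String × String × String)) : PySem.Dict String Int :=
  (PySem.List.enumerate l 0).foldl (uaStepB l) PySem.Dict.empty

-- appending one row: earlier rows see the same prefixes, the new row's prefix is the whole of l
theorem uaB_snoc (l : List (String × String × String × String))
    (p : String × String × String × String) :
    uaBdict (l ++ [p]) =
      (if !(uaPrefHas l p.1 p.2.2.2) then
        (uaBdict l).insert p.1 ((uaBdict l).getD p.1 0 + 1)
      else uaBdict l) := by
  unfold uaBdict
  rw [PySem.List.enumerate_append, List.foldl_append]
  have hcong : List.foldl (uaStepB (l ++ [p])) PySem.Dict.empty (PySem.List.enumerate l 0)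
      = List.foldl (uaStepB l) PySem.Dict.empty (PySem.List.enumerate l 0) := by
    apply PySem.List.foldl_congr_mem
    intro acc x hx
    obtain ⟨k, hk, rfl⟩ := (PySem.List.mem_enumerate_iff l 0 x).mp hx
    simp only [uaStepB, zero_add]
    rw [PySem.List.slice_to_natCast (l ++ [p]) k, PySem.List.slice_to_natCast l k,
      List.take_append_of_le_length (le_of_lt hk)]
  rw [hcong]
  simp only [PySem.List.enumerate_cons, PySem.List.enumerate_nil, List.foldl_cons, List.foldl_nil,
    uaStepB, zero_add]
  rw [PySem.List.slice_to_natCast (l ++ [p]) l.length, List.take_left]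

-- the loop invariant relating A's nested count-dict and B's counter dict + prefix test
theorem ua_inv (l : List (String × String × String × String)) :
    (l.foldl uaStepA PySem.Dict.empty).keys.Nodup ∧
    (uaBdict l).items
      = (l.foldl uaStepA PySem.Dict.empty).items.map (fun q => (q.1, (q.2.size : Int))) ∧
    (∀ a x, uaPrefHas l a x = true ↔
      ∃ d, (l.foldl uaStepA PySem.Dict.empty).get? a = some d ∧ d.contains x = true) := by
  induction l using List.reverseRecOn with
  | nil =>
    refine ⟨?_, ?_, ?_⟩ <;>
      simp [uaBdict, PySem.List.enumerate_nil, uaPrefHas,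
        PySem.Dict.keys, PySem.Dict.empty, PySem.Dict.get?]
  | append_singleton l p ih =>
    obtain ⟨h1, h2, h3⟩ := ih
    rw [List.foldl_append, List.foldl_cons, List.foldl_nil]
    set eA := l.foldl uaStepA PySem.Dict.empty with heA
    have hprefP : ∀ a x, uaPrefHas (l ++ [p]) a x = true ↔
        (uaPrefHas l a x = true ∨ (p.1 = a ∧ p.2.2.2 = x)) := by
      intro a x
      simp [uaPrefHas, List.any_append]
    have hkeys : (uaBdict l).keys = eA.keys := by
      simp [PySem.Dict.keys, h2, List.map_map, Function.comp]
    by_cases hc : eA.contains p.1 = true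
    · -- ancestor already present
      have hsome : ∃ d, eA.get? p.1 = some d := by
        have h := PySem.Dict.contains_eq_isSome_get? eA p.1
        rw [hc] at h
        exact Option.isSome_iff_exists.mp h.symm
      obtain ⟨inner0, hg⟩ := hsome
      have hgd : eA.getD p.1 PySem.Dict.empty = inner0 :=
        PySem.Dict.getD_of_get?_eq_some _ _ hg
      have hccB : (uaBdict l).contains p.1 = true := by
        rw [PySem.Dict.contains_eq_decide_mem_keys, hkeys,
          ← PySem.Dict.contains_eq_decide_mem_keys, hc]
      by_cases hc2 : inner0.contains p.2.2.2 = true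
      · -- (ancestor, abs) already occurred: B skips, A's dict shape unchanged
        have hseen : uaPrefHas l p.1 p.2.2.2 = true := (h3 p.1 p.2.2.2).mpr ⟨inner0, hg, hc2⟩
        have hstepB : uaBdict (l ++ [p]) = uaBdict l := by
          rw [uaB_snoc]; simp [hseen]
        have hstepA : uaStepA eA p
            = eA.insert p.1 (inner0.insert p.2.2.2 (inner0.getD p.2.2.2 0 + 1)) := by
          simp [uaStepA, hc, hgd, hc2]
        rw [hstepB, hstepA]
        refine ⟨?_, ?_, ?_⟩
        · rw [PySem.Dict.keys_insert_of_contains _ _ hc]; exact h1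
        · rw [PySem.Dict.items_insert_of_contains _ _ hc, List.map_map, h2]
          apply List.map_congr_left
          intro q hq
          by_cases hq1 : q.1 = p.1
          · have : eA.get? q.1 = some q.2 := PySem.Dict.get?_of_mem_items _ hq h1
            rw [hq1] at this
            have hq2 : q.2 = inner0 := by rw [this] at hg; exact (Option.some.inj hg)
            simp [Function.comp, hq1, hq2, PySem.Dict.size_insert, hc2]
          · simp [Function.comp, hq1]
        · intro a x
          rw [hprefP a x]
          by_cases ha : a = p.1
          · subst ha
            constructor
            · rintro (h | ⟨_, hx⟩)
              · obtain ⟨d, hd, hdc⟩ := (h3 p.1 x).mp h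
                rw [hg] at hd
                refine ⟨_, PySem.Dict.get?_insert_self _ _ _, ?_⟩
                cases Option.some.inj hd
                rw [PySem.Dict.contains_insert]
                simp [hdc]
              · refine ⟨_, PySem.Dict.get?_insert_self _ _ _, ?_⟩
                rw [PySem.Dict.contains_insert, hx]
                simp
            · rintro ⟨d, hd, hdc⟩
              rw [PySem.Dict.get?_insert_self] at hd
              rw [← Option.some.inj hd, PySem.Dict.contains_insert] at hdc
              rcases Bool.or_eq_true_iff.mp hdc with h | h
              · exact Or.inr ⟨rfl, (eq_of_beq h).symm⟩
              · exact Or.inl ((h3 p.1 x).mpr ⟨inner0, hg, h⟩)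
          · rw [PySem.Dict.get?_insert_of_ne _ _ ha, ← h3 a x]
            constructor
            · rintro (h | ⟨hp, _⟩)
              · exact h
              · exact absurd hp.symm ha
            · exact Or.inl
      · -- ancestor present, new abs location: B increments this ancestor's count
        have hnseen : uaPrefHas l p.1 p.2.2.2 = false := by
          rw [Bool.eq_false_iff]
          intro h
          obtain ⟨d, hd, hdc⟩ := (h3 p.1 p.2.2.2).mp h
          rw [hg] at hd
          rw [← Option.some.inj hd] at hdc
          exact hc2 hdc
        have hmemu : (p.1, (inner0.size : Int)) ∈ (uaBdict l).items := by
          rw [h2]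
          exact List.mem_map.mpr ⟨(p.1, inner0), PySem.Dict.mem_items_of_get?_eq_some _ hg, rfl⟩
        have hnodB : (uaBdict l).keys.Nodup := by rw [hkeys]; exact h1
        have hgB : (uaBdict l).getD p.1 0 = (inner0.size : Int) :=
          PySem.Dict.getD_of_mem_items _ hmemu hnodB 0
        have hstepB : uaBdict (l ++ [p])
            = (uaBdict l).insert p.1 ((inner0.size : Int) + 1) := by
          rw [uaB_snoc]; simp [hnseen, hgB]
        have hstepA : uaStepA eA p = eA.insert p.1 (inner0.insert p.2.2.2 1) := by
          simp [uaStepA, hc, hgd, hc2]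
        rw [hstepB, hstepA]
        refine ⟨?_, ?_, ?_⟩
        · rw [PySem.Dict.keys_insert_of_contains _ _ hc]; exact h1
        · rw [PySem.Dict.items_insert_of_contains _ _ hccB,
            PySem.Dict.items_insert_of_contains _ _ hc, List.map_map, h2, List.map_map]
          apply List.map_congr_left
          intro q hq
          by_cases hq1 : q.1 = p.1
          · simp [Function.comp, hq1, PySem.Dict.size_insert, hc2]
          · simp [Function.comp, hq1]
        · intro a x
          rw [hprefP a x]
          by_cases ha : a = p.1
          · subst ha
            constructor
            · rintro (h | ⟨_, hx⟩)
              · obtain ⟨d, hd, hdc⟩ := (h3 p.1 x).mp h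
                rw [hg] at hd
                refine ⟨_, PySem.Dict.get?_insert_self _ _ _, ?_⟩
                cases Option.some.inj hd
                rw [PySem.Dict.contains_insert]
                simp [hdc]
              · refine ⟨_, PySem.Dict.get?_insert_self _ _ _, ?_⟩
                rw [PySem.Dict.contains_insert, hx]
                simp
            · rintro ⟨d, hd, hdc⟩
              rw [PySem.Dict.get?_insert_self] at hd
              rw [← Option.some.inj hd, PySem.Dict.contains_insert] at hdc
              rcases Bool.or_eq_true_iff.mp hdc with h | h
              · exact Or.inr ⟨rfl, (eq_of_beq h).symm⟩
              · exact Or.inl ((h3 p.1 x).mpr ⟨inner0, hg, h⟩)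
          · rw [PySem.Dict.get?_insert_of_ne _ _ ha, ← h3 a x]
            constructor
            · rintro (h | ⟨hp, _⟩)
              · exact h
              · exact absurd hp.symm ha
            · exact Or.inl
    · -- new ancestor
      have hcf : eA.contains p.1 = false := Bool.eq_false_iff.mpr hc
      have hgnone : eA.get? p.1 = none :=
        (PySem.Dict.get?_eq_none_iff_contains _ _).mpr hcf
      have hnseen : uaPrefHas l p.1 p.2.2.2 = false := by
        rw [Bool.eq_false_iff]
        intro h
        obtain ⟨d, hd, _⟩ := (h3 p.1 p.2.2.2).mp h
        rw [hgnone] at hd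
        simp at hd
      have hccB : (uaBdict l).contains p.1 = false := by
        rw [PySem.Dict.contains_eq_decide_mem_keys, hkeys,
          ← PySem.Dict.contains_eq_decide_mem_keys]
        exact hcf
      have hstepB : uaBdict (l ++ [p]) = (uaBdict l).insert p.1 1 := by
        rw [uaB_snoc]
        simp [hnseen, PySem.Dict.getD_of_not_contains _ _ hccB]
      have hstepA : uaStepA eA p = eA.insert p.1 (PySem.Dict.empty.insert p.2.2.2 1) := by
        simp [uaStepA, hcf, PySem.Dict.insert_insert_self,
          PySem.Dict.getD_of_get?_eq_some _ _ (PySem.Dict.get?_insert_self eA p.1 PySem.Dict.empty),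
          PySem.Dict.contains_empty]
      rw [hstepB, hstepA]
      have hanotin : p.1 ∉ eA.keys := by
        rw [← PySem.Dict.contains_iff_mem_keys]
        rw [hcf]
        exact Bool.false_ne_true
      refine ⟨?_, ?_, ?_⟩
      · rw [PySem.Dict.keys_insert_of_not_contains _ _ hcf]
        simp [List.nodup_append, h1]
        intro a ha h
        exact hanotin (h ▸ ha)
      · rw [PySem.Dict.items_insert_of_not_contains _ _ hccB,
          PySem.Dict.items_insert_of_not_contains _ _ hcf,
          List.map_append, h2]
        simp [PySem.Dict.size_insert, PySem.Dict.contains_empty, PySem.Dict.size_empty]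
      · intro a x
        rw [hprefP a x]
        by_cases ha : a = p.1
        · subst ha
          constructor
          · rintro (h | ⟨_, hx⟩)
            · obtain ⟨d, hd, _⟩ := (h3 p.1 x).mp h
              rw [hgnone] at hd
              simp at hd
            · refine ⟨_, PySem.Dict.get?_insert_self _ _ _, ?_⟩
              rw [PySem.Dict.contains_insert, hx]
              simp
          · rintro ⟨d, hd, hdc⟩
            rw [PySem.Dict.get?_insert_self] at hd
            rw [← Option.some.inj hd, PySem.Dict.contains_insert] at hdc
            rcases Bool.or_eq_true_iff.mp hdc with h | h
            · exact Or.inr ⟨rfl, (eq_of_beq h).symm⟩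
            · rw [PySem.Dict.contains_empty] at h
              exact absurd h Bool.false_ne_true
        · rw [PySem.Dict.get?_insert_of_ne _ _ ha, ← h3 a x]
          constructor
          · rintro (h | ⟨hp, _⟩)
            · exact h
            · exact absurd hp.symm ha
          · exact Or.inl

-- ===== VERDICT (by name: the statement is the Claim_ definition above) =====
theorem unique_ancestors_spec : Claim_equal_unique_ancestors := by
  intro pairs_list _
  obtain ⟨h1, h2, _⟩ := ua_inv pairs_list
  show unique_ancestors pairs_list = unique_ancestors_alt pairs_list
  have halt : unique_ancestors_alt pairs_list = (uaBdict pairs_list).items := rfl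
  simp only [unique_ancestors, halt]
  rw [h2]
  have h := PySem.Dict.items_foldl_insert_fresh
      ((pairs_list.foldl uaStepA PySem.Dict.empty).items)
      (fun q => q.1) (fun q => ((q.2.size : Int))) PySem.Dict.empty
      (by simp [PySem.Dict.contains_empty])
      (by simpa [PySem.Dict.keys] using h1)
  exact h.trans (by simp [PySem.Dict.empty])
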